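-- pv_equiv track=rewrite | github.com/samintisar/google-maps-lead-generation | backend/app/shared/services/perplexity_service.py | _extract_business_intelligence_fallback
-- ===== SOURCE A (Python) =====
-- from typing import Dict, Any, Optional, List
--
-- def _extract_business_intelligence_fallback(content: str) -> Dict[str, Any]:
--     """Fallback method to extract business intelligence from unstructured content."""
--
--     intelligence = {
--         "ideal_customer_profile": "No customer profile information available",
--         "pain_points": "No pain points identified",
--         "key_goals": "No key goals identified",
--         "company_description": "No company description available",
--         "recent_news": "No recent news found",
--         "key_personnel": "No personnel information available"
--     }
--
--     # Split content into sections and look for relevant information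
--     sections = content.split('\n')
--     current_section = ""
--
--     for line in sections:
--         line_lower = line.lower().strip()
--
--         # Skip empty lines
--         if not line_lower:
--             continue
--
--         # Look for section headers or content patterns
--         if any(keyword in line_lower for keyword in ['customer profile', 'ideal customer', 'target customer', 'icp']):
--             current_section = "ideal_customer_profile"
--             continue
--         elif any(keyword in line_lower for keyword in ['pain point', 'challenge', 'problem', 'difficulty']):
--             current_section = "pain_points"
--             continue
--         elif any(keyword in line_lower for keyword in ['goal', 'objective', 'strategy', 'plan']):
--             current_section = "key_goals"
--             continue
--         elif any(keyword in line_lower for keyword in ['company', 'business model', 'overview', 'description']):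
--             current_section = "company_description"
--             continue
--         elif any(keyword in line_lower for keyword in ['recent', 'news', 'announcement', 'update']):
--             current_section = "recent_news"
--             continue
--         elif any(keyword in line_lower for keyword in ['personnel', 'team', 'leadership', 'ceo', 'founder']):
--             current_section = "key_personnel"
--             continue
--
--         # Add content to current section if we have one
--         if current_section and line.strip() and not line.startswith('#'):
--             if intelligence[current_section] in ["No customer profile information available",
--                                                 "No pain points identified",
--                                                 "No key goals identified",
--                                                 "No company description available",
--                                                 "No recent news found",
--                                                 "No personnel information available"]:
--                 intelligence[current_section] = line.strip()
--             else:
--                 intelligence[current_section] += " " + line.strip()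
--
--     # Clean up the extracted text
--     for key in intelligence:
--         if intelligence[key] and len(intelligence[key]) > 500:
--             intelligence[key] = intelligence[key][:500] + "..."
--
--     return intelligence
-- ===== SOURCE B (Python) =====
-- DEFAULTS = [
--     ("ideal_customer_profile", "No customer profile information available"),
--     ("pain_points", "No pain points identified"),
--     ("key_goals", "No key goals identified"),
--     ("company_description", "No company description available"),
--     ("recent_news", "No recent news found"),
--     ("key_personnel", "No personnel information available"),
-- ]
--
-- GROUPS = [
--     ("ideal_customer_profile", ['customer profile', 'ideal customer', 'target customer', 'icp']),
--     ("pain_points", ['pain point', 'challenge', 'problem', 'difficulty']),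
--     ("key_goals", ['goal', 'objective', 'strategy', 'plan']),
--     ("company_description", ['company', 'business model', 'overview', 'description']),
--     ("recent_news", ['recent', 'news', 'announcement', 'update']),
--     ("key_personnel", ['personnel', 'team', 'leadership', 'ceo', 'founder']),
-- ]
--
-- ALL_DEFAULTS = [d for _, d in DEFAULTS]
--
--
-- def _tokenize(line):
--     """Turn a raw line into a token: ('skip', None), ('header', section) or ('content', stripped)."""
--     ll = line.lower().strip()
--     if not ll:
--         return ('skip', None)
--     for sec, kws in GROUPS:
--         if any(kw in ll for kw in kws):
--             return ('header', sec)
--     s = line.strip()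
--     if s and not line.startswith('#'):
--         return ('content', s)
--     return ('skip', None)
--
--
-- def _extract_business_intelligence_fallback(content: str):
--     # Stage 1: tokenize every line.
--     tokens = [_tokenize(l) for l in content.split('\n')]
--
--     # Stage 2: segment the token stream into (section, body) chunks with a
--     # two-level scan: each header opens a chunk that absorbs the content
--     # tokens up to the next header; tokens before the first header are dropped.
--     segments = []
--     i, n = 0, len(tokens)
--     while i < n:
--         if tokens[i][0] != 'header':
--             i += 1
--             continue
--         sec = tokens[i][1]
--         j = i + 1
--         body = []
--         while j < n and tokens[j][0] != 'header':
--             if tokens[j][0] == 'content':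
--                 body.append(tokens[j][1])
--             j += 1
--         segments.append((sec, body))
--         i = j
--
--     # Stage 3: per key, reduce the bodies of its chunks starting from the
--     # default (replace while the value is still some default, else append),
--     # then truncate long values.
--     result = {}
--     for key, default in DEFAULTS:
--         value = default
--         for sec, body in segments:
--             if sec == key:
--                 for piece in body:
--                     value = piece if value in ALL_DEFAULTS else value + " " + piece
--         result[key] = value[:500] + "..." if len(value) > 500 else value
--     return result
-- ===== Notes on version B (the rewrite author's own statement) =====
-- stated objective: alternative
-- what changed: Replaced A's single stateful classify-and-accumulate loop that mutates the result dict per line with a staged pipeline: tokenize each line into skip/header/content, segment the token stream into explicit (section, body) chunks with a two-level index scan, then per key reduce the bodies of its chunks from the default string and truncate.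
import Mathlib
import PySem

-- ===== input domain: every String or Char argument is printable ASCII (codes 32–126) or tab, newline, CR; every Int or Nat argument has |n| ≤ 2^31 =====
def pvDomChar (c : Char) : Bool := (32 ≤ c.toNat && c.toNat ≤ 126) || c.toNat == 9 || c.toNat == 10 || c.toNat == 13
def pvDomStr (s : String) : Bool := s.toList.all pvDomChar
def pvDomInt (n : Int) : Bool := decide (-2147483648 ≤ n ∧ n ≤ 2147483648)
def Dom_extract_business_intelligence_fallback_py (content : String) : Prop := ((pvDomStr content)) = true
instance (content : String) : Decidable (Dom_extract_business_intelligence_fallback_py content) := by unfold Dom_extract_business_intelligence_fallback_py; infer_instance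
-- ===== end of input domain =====

-- B replaces A's single stateful classify-and-accumulate loop (mutating the result dict per line)
-- with a staged pipeline: tokenize lines into skip/header/content tokens, segment the token stream
-- into explicit (section, body) chunks, then per key reduce its chunks' bodies from the default and
-- truncate; objective: alternative structure, same cost.

-- ===== PORT A =====

def pvDefaultsA : List String :=
  ["No customer profile information available",
   "No pain points identified",
   "No key goals identified",
   "No company description available",
   "No recent news found",
   "No personnel information available"]

def pvStepA (st : PySem.Dict String String × String) (line : String) :
    PySem.Dict String String × String :=
  let ll := PySem.Str.strip (PySem.Str.lower line)
  if ll = "" then st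
  else if ["customer profile", "ideal customer", "target customer", "icp"].any
      (fun kw => PySem.Str.isIn kw ll) then (st.1, "ideal_customer_profile")
  else if ["pain point", "challenge", "problem", "difficulty"].any
      (fun kw => PySem.Str.isIn kw ll) then (st.1, "pain_points")
  else if ["goal", "objective", "strategy", "plan"].any
      (fun kw => PySem.Str.isIn kw ll) then (st.1, "key_goals")
  else if ["company", "business model", "overview", "description"].any
      (fun kw => PySem.Str.isIn kw ll) then (st.1, "company_description")
  else if ["recent", "news", "announcement", "update"].any
      (fun kw => PySem.Str.isIn kw ll) then (st.1, "recent_news")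
  else if ["personnel", "team", "leadership", "ceo", "founder"].any
      (fun kw => PySem.Str.isIn kw ll) then (st.1, "key_personnel")
  else if st.2 ≠ "" ∧ PySem.Str.strip line ≠ "" ∧ PySem.Str.startswith line "#" = false then
    (if st.1.getD st.2 "" ∈ pvDefaultsA then
       st.1.insert st.2 (PySem.Str.strip line)
     else
       st.1.insert st.2 (st.1.getD st.2 "" ++ " " ++ PySem.Str.strip line), st.2)
  else st

def pvCleanA (d : PySem.Dict String String) (key : String) : PySem.Dict String String :=
  if d.getD key "" ≠ "" ∧ PySem.Str.len (d.getD key "") > 500 then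
    d.insert key (PySem.Str.slice (d.getD key "") none (some 500) ++ "...")
  else d

def extract_business_intelligence_fallback_py (content : String) : List (String × String) :=
  let intelligence : PySem.Dict String String := PySem.Dict.ofList
    [("ideal_customer_profile", "No customer profile information available"),
     ("pain_points", "No pain points identified"),
     ("key_goals", "No key goals identified"),
     ("company_description", "No company description available"),
     ("recent_news", "No recent news found"),
     ("key_personnel", "No personnel information available")]
  -- content.split('\n'): sep "\n" ≠ "" so split? is always `some`
  let sections := (PySem.Str.split? content "\n").getD []
  let final := (sections.foldl pvStepA (intelligence, "")).1
  (final.keys.foldl pvCleanA final).items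

-- ===== PORT B =====

def pvDefaultsTable : List (String × String) :=
  [("ideal_customer_profile", "No customer profile information available"),
   ("pain_points", "No pain points identified"),
   ("key_goals", "No key goals identified"),
   ("company_description", "No company description available"),
   ("recent_news", "No recent news found"),
   ("key_personnel", "No personnel information available")]

def pvKeywordTable : List (String × List String) :=
  [("ideal_customer_profile", ["customer profile", "ideal customer", "target customer", "icp"]),
   ("pain_points", ["pain point", "challenge", "problem", "difficulty"]),
   ("key_goals", ["goal", "objective", "strategy", "plan"]),
   ("company_description", ["company", "business model", "overview", "description"]),
   ("recent_news", ["recent", "news", "announcement", "update"]),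
   ("key_personnel", ["personnel", "team", "leadership", "ceo", "founder"])]

def pvAllDefaults : List String := pvDefaultsTable.map (·.2)

def pvClassify : List (String × List String) → String → Option String
  | [], _ => none
  | (sec, kws) :: rest, ll =>
      if kws.any (fun kw => PySem.Str.isIn kw ll) then some sec else pvClassify rest ll

-- token of one raw line: skip | header section | content strippedLine  (Source B's _tokenize)
inductive PvTok
  | skip
  | header : String → PvTok
  | content : String → PvTok
deriving DecidableEq, Repr

def pvTok (line : String) : PvTok :=
  let ll := PySem.Str.strip (PySem.Str.lower line)
  if ll = "" then PvTok.skip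
  else
    match pvClassify pvKeywordTable ll with
    | some sec => PvTok.header sec
    | none =>
        let s := PySem.Str.strip line
        if s ≠ "" ∧ PySem.Str.startswith line "#" = false then PvTok.content s
        else PvTok.skip

-- inner while loop of Source B: collect content up to the next header, return it with the rest
def pvBody : List PvTok → List String × List PvTok
  | [] => ([], [])
  | PvTok.header sec :: ts => ([], PvTok.header sec :: ts)
  | PvTok.skip :: ts => pvBody ts
  | PvTok.content s :: ts => (s :: (pvBody ts).1, (pvBody ts).2)

-- termination measure for pvSegments (the outer while loop advances i to j ≥ i+1)
lemma pvBody_len : ∀ ts : List PvTok, (pvBody ts).2.length ≤ ts.length := by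
  intro ts
  induction ts with
  | nil => simp [pvBody]
  | cons t ts ih => cases t <;> simp [pvBody] <;> omega

-- outer while loop of Source B: each header opens a (section, body) chunk
def pvSegments : List PvTok → List (String × List String)
  | [] => []
  | PvTok.header sec :: ts => (sec, (pvBody ts).1) :: pvSegments (pvBody ts).2
  | PvTok.skip :: ts => pvSegments ts
  | PvTok.content _ :: ts => pvSegments ts
termination_by ts => ts.length
decreasing_by
  · exact Nat.lt_succ_of_le (pvBody_len ts)
  · simp
  · simp

def extract_business_intelligence_fallback_py_alt (content : String) : List (String × String) :=
  let tokens := ((PySem.Str.split? content "\n").getD []).map pvTok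
  let segs := pvSegments tokens
  pvDefaultsTable.map (fun kd =>
    let v := segs.foldl (fun acc sb =>
      if sb.1 = kd.1 then
        sb.2.foldl (fun a p => if a ∈ pvAllDefaults then p else a ++ " " ++ p) acc
      else acc) kd.2
    (kd.1, if PySem.Str.len v > 500 then PySem.Str.slice v none (some 500) ++ "..." else v))

-- ===== PRECONDITION & SPEC =====
def Spec_extract_business_intelligence_fallback_py (content : String) (out : List (String × String)) : Prop := out = extract_business_intelligence_fallback_py_alt content
instance (content : String) (out : List (String × String)) : Decidable (Spec_extract_business_intelligence_fallback_py content out) := by unfold Spec_extract_business_intelligence_fallback_py; infer_instance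

-- ===== CLAIM (what is proved, stated in full; the proofs are below) =====
def Claim_equal_extract_business_intelligence_fallback_py : Prop := ∀ (content : String), Dom_extract_business_intelligence_fallback_py content → Spec_extract_business_intelligence_fallback_py content (extract_business_intelligence_fallback_py content)

-- ===== LEMMAS AND PROOFS =====

-- the keyword tests of the six sections, on an arbitrary (lowered, stripped) line
def pvC1 (ll : String) : Bool := ["customer profile", "ideal customer", "target customer", "icp"].any (fun kw => PySem.Str.isIn kw ll)
def pvC2 (ll : String) : Bool := ["pain point", "challenge", "problem", "difficulty"].any (fun kw => PySem.Str.isIn kw ll)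
def pvC3 (ll : String) : Bool := ["goal", "objective", "strategy", "plan"].any (fun kw => PySem.Str.isIn kw ll)
def pvC4 (ll : String) : Bool := ["company", "business model", "overview", "description"].any (fun kw => PySem.Str.isIn kw ll)
def pvC5 (ll : String) : Bool := ["recent", "news", "announcement", "update"].any (fun kw => PySem.Str.isIn kw ll)
def pvC6 (ll : String) : Bool := ["personnel", "team", "leadership", "ceo", "founder"].any (fun kw => PySem.Str.isIn kw ll)

lemma classify_unfold (ll : String) :
    pvClassify pvKeywordTable ll =
      (if pvC1 ll then some "ideal_customer_profile"
       else if pvC2 ll then some "pain_points"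
       else if pvC3 ll then some "key_goals"
       else if pvC4 ll then some "company_description"
       else if pvC5 ll then some "recent_news"
       else if pvC6 ll then some "key_personnel"
       else none) := rfl

-- the per-key accumulation step and reduction (shared shape of both programs)
def pvStep (acc p : String) : String := if acc ∈ pvDefaultsA then p else acc ++ " " ++ p
def pvRed (v : String) (ps : List String) : String := ps.foldl pvStep v

-- the lines A's loop assigns to key k, starting from current section cur
def pvPieces : List String → String → String → List String
  | [], _, _ => []
  | l :: ls, cur, k =>
    if PySem.Str.strip (PySem.Str.lower l) = "" then pvPieces ls cur k
    else match pvClassify pvKeywordTable (PySem.Str.strip (PySem.Str.lower l)) with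
      | some sec => pvPieces ls sec k
      | none => if cur = k ∧ cur ≠ "" ∧ PySem.Str.strip l ≠ "" ∧ PySem.Str.startswith l "#" = false
                then PySem.Str.strip l :: pvPieces ls cur k else pvPieces ls cur k

lemma pieces_skip (ls : List String) (l cur : String)
    (h : PySem.Str.strip (PySem.Str.lower l) = "") :
    ∀ k, pvPieces (l :: ls) cur k = pvPieces ls cur k := by
  intro k; simp only [pvPieces]; rw [if_pos h]
lemma pieces_hdr (ls : List String) (l cur sec : String)
    (h : ¬ PySem.Str.strip (PySem.Str.lower l) = "")
    (hc : pvClassify pvKeywordTable (PySem.Str.strip (PySem.Str.lower l)) = some sec) :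
    ∀ k, pvPieces (l :: ls) cur k = pvPieces ls sec k := by
  intro k; simp only [pvPieces]; rw [if_neg h, hc]
lemma pieces_add (ls : List String) (l cur k : String)
    (h : ¬ PySem.Str.strip (PySem.Str.lower l) = "")
    (hc : pvClassify pvKeywordTable (PySem.Str.strip (PySem.Str.lower l)) = none)
    (hg : cur = k ∧ cur ≠ "" ∧ PySem.Str.strip l ≠ "" ∧ PySem.Str.startswith l "#" = false) :
    pvPieces (l :: ls) cur k = PySem.Str.strip l :: pvPieces ls cur k := by
  simp only [pvPieces]; rw [if_neg h, hc]; exact if_pos hg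
lemma pieces_noadd (ls : List String) (l cur k : String)
    (h : ¬ PySem.Str.strip (PySem.Str.lower l) = "")
    (hc : pvClassify pvKeywordTable (PySem.Str.strip (PySem.Str.lower l)) = none)
    (hg : ¬ (cur = k ∧ cur ≠ "" ∧ PySem.Str.strip l ≠ "" ∧ PySem.Str.startswith l "#" = false)) :
    pvPieces (l :: ls) cur k = pvPieces ls cur k := by
  simp only [pvPieces]; rw [if_neg h, hc]; exact if_neg hg
lemma pieces_noguard (ls : List String) (l cur : String)
    (h : ¬ PySem.Str.strip (PySem.Str.lower l) = "")
    (hc : pvClassify pvKeywordTable (PySem.Str.strip (PySem.Str.lower l)) = none)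
    (hg : ¬ (cur ≠ "" ∧ PySem.Str.strip l ≠ "" ∧ PySem.Str.startswith l "#" = false)) :
    ∀ k, pvPieces (l :: ls) cur k = pvPieces ls cur k := by
  intro k; exact pieces_noadd ls l cur k h hc (fun hh => hg hh.2)

-- ---- B side: tokens, segments, and the pieces they contribute ----

lemma tok_skip0 (l : String) (h : PySem.Str.strip (PySem.Str.lower l) = "") :
    pvTok l = PvTok.skip := by
  unfold pvTok; rw [if_pos h]
lemma tok_header (l sec : String) (h : ¬ PySem.Str.strip (PySem.Str.lower l) = "")
    (hc : pvClassify pvKeywordTable (PySem.Str.strip (PySem.Str.lower l)) = some sec) :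
    pvTok l = PvTok.header sec := by
  unfold pvTok; rw [if_neg h, hc]
lemma tok_content (l : String) (h : ¬ PySem.Str.strip (PySem.Str.lower l) = "")
    (hc : pvClassify pvKeywordTable (PySem.Str.strip (PySem.Str.lower l)) = none)
    (hg : PySem.Str.strip l ≠ "" ∧ PySem.Str.startswith l "#" = false) :
    pvTok l = PvTok.content (PySem.Str.strip l) := by
  unfold pvTok; rw [if_neg h, hc]; exact if_pos hg
lemma tok_skip1 (l : String) (h : ¬ PySem.Str.strip (PySem.Str.lower l) = "")
    (hc : pvClassify pvKeywordTable (PySem.Str.strip (PySem.Str.lower l)) = none)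
    (hg : ¬ (PySem.Str.strip l ≠ "" ∧ PySem.Str.startswith l "#" = false)) :
    pvTok l = PvTok.skip := by
  unfold pvTok; rw [if_neg h, hc]; exact if_neg hg

lemma classify_ne (ll sec : String) (hc : pvClassify pvKeywordTable ll = some sec) :
    sec ≠ "" := by
  rw [classify_unfold] at hc
  split_ifs at hc <;> simp only [Option.some.injEq] at hc <;> (subst hc; decide)

lemma tok_eq_header (l sec : String) (h : pvTok l = PvTok.header sec) : sec ≠ "" := by
  by_cases h0 : PySem.Str.strip (PySem.Str.lower l) = ""
  · rw [tok_skip0 l h0] at h; cases h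
  · cases hc : pvClassify pvKeywordTable (PySem.Str.strip (PySem.Str.lower l)) with
    | some s =>
      rw [tok_header l s h0 hc] at h
      obtain rfl : s = sec := by cases h; rfl
      exact classify_ne _ _ hc
    | none =>
      by_cases hg : PySem.Str.strip l ≠ "" ∧ PySem.Str.startswith l "#" = false
      · rw [tok_content l h0 hc hg] at h; cases h
      · rw [tok_skip1 l h0 hc hg] at h; cases h

lemma headers_ne_map (ls : List String) :
    ∀ sec, PvTok.header sec ∈ ls.map pvTok → sec ≠ "" := by
  intro sec hmem
  rcases List.mem_map.mp hmem with ⟨l, _, hl⟩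
  exact tok_eq_header l sec hl

-- A's pieces function restated over the token stream
def pvPiecesT : List PvTok → String → String → List String
  | [], _, _ => []
  | PvTok.skip :: ts, cur, k => pvPiecesT ts cur k
  | PvTok.header sec :: ts, _, k => pvPiecesT ts sec k
  | PvTok.content s :: ts, cur, k =>
      if cur = k ∧ cur ≠ "" then s :: pvPiecesT ts cur k else pvPiecesT ts cur k

lemma pieces_eq_piecesT : ∀ (ls : List String) (cur k : String),
    pvPieces ls cur k = pvPiecesT (ls.map pvTok) cur k := by
  intro ls
  induction ls with
  | nil => intro cur k; rfl
  | cons l ls ih =>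
    intro cur k
    rw [List.map_cons]
    by_cases h0 : PySem.Str.strip (PySem.Str.lower l) = ""
    · rw [pieces_skip ls l cur h0, tok_skip0 l h0]
      exact ih cur k
    · cases hc : pvClassify pvKeywordTable (PySem.Str.strip (PySem.Str.lower l)) with
      | some sec =>
        rw [pieces_hdr ls l cur sec h0 hc, tok_header l sec h0 hc]
        exact ih sec k
      | none =>
        by_cases hg : PySem.Str.strip l ≠ "" ∧ PySem.Str.startswith l "#" = false
        · rw [tok_content l h0 hc hg]
          by_cases hck : cur = k ∧ cur ≠ ""
          · rw [pieces_add ls l cur k h0 hc ⟨hck.1, hck.2, hg.1, hg.2⟩]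
            simp only [pvPiecesT]
            rw [if_pos hck, ih]
          · rw [pieces_noadd ls l cur k h0 hc (fun hh => hck ⟨hh.1, hh.2.1⟩)]
            simp only [pvPiecesT]
            rw [if_neg hck, ih]
        · rw [tok_skip1 l h0 hc hg,
            pieces_noadd ls l cur k h0 hc (fun hh => hg ⟨hh.2.2.1, hh.2.2.2⟩)]
          exact ih cur k

-- pieces of key k contributed by the segments (Source B's per-key filter-and-concat)
def pvConcatFor (k : String) : List (String × List String) → List String
  | [] => []
  | sb :: rest => if sb.1 = k then sb.2 ++ pvConcatFor k rest else pvConcatFor k rest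

lemma segments_drop : ∀ ts : List PvTok, pvSegments (pvBody ts).2 = pvSegments ts := by
  intro ts
  induction ts with
  | nil => rfl
  | cons t ts ih =>
    cases t with
    | skip => simp only [pvBody, pvSegments]; exact ih
    | header sec => rfl
    | content s => simp only [pvBody, pvSegments]; exact ih

lemma piecesT_eq : ∀ (ts : List PvTok) (cur k : String),
    (∀ sec, PvTok.header sec ∈ ts → sec ≠ "") →
    pvPiecesT ts cur k =
      (if cur = k ∧ cur ≠ "" then (pvBody ts).1 else []) ++
        pvConcatFor k (pvSegments (pvBody ts).2) := by
  intro ts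
  induction ts with
  | nil => intro cur k _; simp [pvPiecesT, pvBody, pvSegments, pvConcatFor]
  | cons t ts ih =>
    intro cur k hne
    have hne' : ∀ sec, PvTok.header sec ∈ ts → sec ≠ "" :=
      fun sec hs => hne sec (List.mem_cons_of_mem _ hs)
    cases t with
    | skip =>
      simp only [pvPiecesT, pvBody]
      exact ih cur k hne'
    | header sec =>
      have hsec : sec ≠ "" := hne sec List.mem_cons_self
      have hpv : pvPiecesT (PvTok.header sec :: ts) cur k = pvPiecesT ts sec k := rfl
      have hbd : pvBody (PvTok.header sec :: ts) = ([], PvTok.header sec :: ts) := rfl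
      rw [hpv, hbd]
      have h0 : (if cur = k ∧ cur ≠ "" then ([] : List String) else []) = [] := by
        split <;> rfl
      rw [h0, List.nil_append,
        show pvSegments (PvTok.header sec :: ts)
            = (sec, (pvBody ts).1) :: pvSegments (pvBody ts).2 from by simp [pvSegments]]
      simp only [pvConcatFor]
      rw [ih sec k hne']
      by_cases hsk : sec = k
      · rw [if_pos (show (sec, (pvBody ts).1).1 = k from hsk), if_pos ⟨hsk, hsec⟩]
      · rw [if_neg (show ¬ (sec, (pvBody ts).1).1 = k from hsk),
          if_neg (fun hh : sec = k ∧ sec ≠ "" => hsk hh.1), List.nil_append]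
    | content s =>
      simp only [pvPiecesT, pvBody]
      rw [ih cur k hne']
      by_cases hck : cur = k ∧ cur ≠ ""
      · rw [if_pos hck, if_pos hck, if_pos hck]; rfl
      · rw [if_neg hck, if_neg hck, if_neg hck]

lemma pieces_concat (ls : List String) (k : String) :
    pvPieces ls "" k = pvConcatFor k (pvSegments (ls.map pvTok)) := by
  rw [pieces_eq_piecesT, piecesT_eq (ls.map pvTok) "" k (headers_ne_map ls)]
  rw [if_neg (by simp), List.nil_append, segments_drop]

lemma fold_concat (k : String) : ∀ (segs : List (String × List String)) (acc : String),
    segs.foldl (fun acc sb =>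
      if sb.1 = k then
        sb.2.foldl (fun a p => if a ∈ pvAllDefaults then p else a ++ " " ++ p) acc
      else acc) acc = pvRed acc (pvConcatFor k segs) := by
  intro segs
  induction segs with
  | nil => intro acc; rfl
  | cons sb rest ih =>
    intro acc
    rw [List.foldl_cons]
    simp only [pvConcatFor]
    by_cases hk : sb.1 = k
    · rw [if_pos hk, if_pos hk, ih]
      show pvRed (sb.2.foldl pvStep acc) (pvConcatFor k rest) = pvRed acc (sb.2 ++ pvConcatFor k rest)
      simp only [pvRed, List.foldl_append]
    · rw [if_neg hk, if_neg hk, ih]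

-- ---- A side: the dict with the six fixed keys ----

def pvMk6 (v1 v2 v3 v4 v5 v6 : String) : PySem.Dict String String :=
  PySem.Dict.ofList
    [("ideal_customer_profile", v1), ("pain_points", v2), ("key_goals", v3),
     ("company_description", v4), ("recent_news", v5), ("key_personnel", v6)]

lemma mk6_getD_1 (v1 v2 v3 v4 v5 v6 : String) : (pvMk6 v1 v2 v3 v4 v5 v6).getD "ideal_customer_profile" "" = v1 := rfl
lemma mk6_getD_2 (v1 v2 v3 v4 v5 v6 : String) : (pvMk6 v1 v2 v3 v4 v5 v6).getD "pain_points" "" = v2 := rfl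
lemma mk6_getD_3 (v1 v2 v3 v4 v5 v6 : String) : (pvMk6 v1 v2 v3 v4 v5 v6).getD "key_goals" "" = v3 := rfl
lemma mk6_getD_4 (v1 v2 v3 v4 v5 v6 : String) : (pvMk6 v1 v2 v3 v4 v5 v6).getD "company_description" "" = v4 := rfl
lemma mk6_getD_5 (v1 v2 v3 v4 v5 v6 : String) : (pvMk6 v1 v2 v3 v4 v5 v6).getD "recent_news" "" = v5 := rfl
lemma mk6_getD_6 (v1 v2 v3 v4 v5 v6 : String) : (pvMk6 v1 v2 v3 v4 v5 v6).getD "key_personnel" "" = v6 := rfl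
lemma mk6_insert_1 (v1 v2 v3 v4 v5 v6 w : String) : (pvMk6 v1 v2 v3 v4 v5 v6).insert "ideal_customer_profile" w = pvMk6 w v2 v3 v4 v5 v6 := rfl
lemma mk6_insert_2 (v1 v2 v3 v4 v5 v6 w : String) : (pvMk6 v1 v2 v3 v4 v5 v6).insert "pain_points" w = pvMk6 v1 w v3 v4 v5 v6 := rfl
lemma mk6_insert_3 (v1 v2 v3 v4 v5 v6 w : String) : (pvMk6 v1 v2 v3 v4 v5 v6).insert "key_goals" w = pvMk6 v1 v2 w v4 v5 v6 := rfl
lemma mk6_insert_4 (v1 v2 v3 v4 v5 v6 w : String) : (pvMk6 v1 v2 v3 v4 v5 v6).insert "company_description" w = pvMk6 v1 v2 v3 w v5 v6 := rfl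
lemma mk6_insert_5 (v1 v2 v3 v4 v5 v6 w : String) : (pvMk6 v1 v2 v3 v4 v5 v6).insert "recent_news" w = pvMk6 v1 v2 v3 v4 w v6 := rfl
lemma mk6_insert_6 (v1 v2 v3 v4 v5 v6 w : String) : (pvMk6 v1 v2 v3 v4 v5 v6).insert "key_personnel" w = pvMk6 v1 v2 v3 v4 v5 w := rfl

lemma stepA_skip (st : PySem.Dict String String × String) (l : String)
    (h : PySem.Str.strip (PySem.Str.lower l) = "") : pvStepA st l = st := by
  simp only [pvStepA]; rw [if_pos h]

lemma stepA_hdr (st : PySem.Dict String String × String) (l sec : String)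
    (h : ¬ PySem.Str.strip (PySem.Str.lower l) = "")
    (hc : pvClassify pvKeywordTable (PySem.Str.strip (PySem.Str.lower l)) = some sec) :
    pvStepA st l = (st.1, sec) := by
  rw [classify_unfold] at hc
  simp only [pvStepA]; rw [if_neg h]
  simp only [pvC1, pvC2, pvC3, pvC4, pvC5, pvC6] at hc
  by_cases c1 : ["customer profile", "ideal customer", "target customer", "icp"].any (fun kw => PySem.Str.isIn kw (PySem.Str.strip (PySem.Str.lower l))) = true
  · rw [if_pos c1]; rw [if_pos c1] at hc; exact congrArg _ (Option.some.inj hc)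
  · rw [if_neg c1]; rw [if_neg c1] at hc
    by_cases c2 : ["pain point", "challenge", "problem", "difficulty"].any (fun kw => PySem.Str.isIn kw (PySem.Str.strip (PySem.Str.lower l))) = true
    · rw [if_pos c2]; rw [if_pos c2] at hc; exact congrArg _ (Option.some.inj hc)
    · rw [if_neg c2]; rw [if_neg c2] at hc
      by_cases c3 : ["goal", "objective", "strategy", "plan"].any (fun kw => PySem.Str.isIn kw (PySem.Str.strip (PySem.Str.lower l))) = true
      · rw [if_pos c3]; rw [if_pos c3] at hc; exact congrArg _ (Option.some.inj hc)
      · rw [if_neg c3]; rw [if_neg c3] at hc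
        by_cases c4 : ["company", "business model", "overview", "description"].any (fun kw => PySem.Str.isIn kw (PySem.Str.strip (PySem.Str.lower l))) = true
        · rw [if_pos c4]; rw [if_pos c4] at hc; exact congrArg _ (Option.some.inj hc)
        · rw [if_neg c4]; rw [if_neg c4] at hc
          by_cases c5 : ["recent", "news", "announcement", "update"].any (fun kw => PySem.Str.isIn kw (PySem.Str.strip (PySem.Str.lower l))) = true
          · rw [if_pos c5]; rw [if_pos c5] at hc; exact congrArg _ (Option.some.inj hc)
          · rw [if_neg c5]; rw [if_neg c5] at hc
            by_cases c6 : ["personnel", "team", "leadership", "ceo", "founder"].any (fun kw => PySem.Str.isIn kw (PySem.Str.strip (PySem.Str.lower l))) = true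
            · rw [if_pos c6]; rw [if_pos c6] at hc; exact congrArg _ (Option.some.inj hc)
            · rw [if_neg c6] at hc; exact absurd hc (by simp)

lemma stepA_none_aux (st : PySem.Dict String String × String) (l : String)
    (h : ¬ PySem.Str.strip (PySem.Str.lower l) = "")
    (hc : pvClassify pvKeywordTable (PySem.Str.strip (PySem.Str.lower l)) = none) :
    pvStepA st l =
      (if st.2 ≠ "" ∧ PySem.Str.strip l ≠ "" ∧ PySem.Str.startswith l "#" = false then
        (if st.1.getD st.2 "" ∈ pvDefaultsA then
           st.1.insert st.2 (PySem.Str.strip l)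
         else
           st.1.insert st.2 (st.1.getD st.2 "" ++ " " ++ PySem.Str.strip l), st.2)
      else st) := by
  rw [classify_unfold] at hc
  simp only [pvC1, pvC2, pvC3, pvC4, pvC5, pvC6] at hc
  simp only [pvStepA]; rw [if_neg h]
  by_cases c1 : ["customer profile", "ideal customer", "target customer", "icp"].any (fun kw => PySem.Str.isIn kw (PySem.Str.strip (PySem.Str.lower l))) = true
  · rw [if_pos c1] at hc; exact absurd hc (by simp)
  · rw [if_neg c1]; rw [if_neg c1] at hc
    by_cases c2 : ["pain point", "challenge", "problem", "difficulty"].any (fun kw => PySem.Str.isIn kw (PySem.Str.strip (PySem.Str.lower l))) = true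
    · rw [if_pos c2] at hc; exact absurd hc (by simp)
    · rw [if_neg c2]; rw [if_neg c2] at hc
      by_cases c3 : ["goal", "objective", "strategy", "plan"].any (fun kw => PySem.Str.isIn kw (PySem.Str.strip (PySem.Str.lower l))) = true
      · rw [if_pos c3] at hc; exact absurd hc (by simp)
      · rw [if_neg c3]; rw [if_neg c3] at hc
        by_cases c4 : ["company", "business model", "overview", "description"].any (fun kw => PySem.Str.isIn kw (PySem.Str.strip (PySem.Str.lower l))) = true
        · rw [if_pos c4] at hc; exact absurd hc (by simp)
        · rw [if_neg c4]; rw [if_neg c4] at hc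
          by_cases c5 : ["recent", "news", "announcement", "update"].any (fun kw => PySem.Str.isIn kw (PySem.Str.strip (PySem.Str.lower l))) = true
          · rw [if_pos c5] at hc; exact absurd hc (by simp)
          · rw [if_neg c5]; rw [if_neg c5] at hc
            by_cases c6 : ["personnel", "team", "leadership", "ceo", "founder"].any (fun kw => PySem.Str.isIn kw (PySem.Str.strip (PySem.Str.lower l))) = true
            · rw [if_pos c6] at hc; exact absurd hc (by simp)
            · rw [if_neg c6]

lemma stepA_add (st : PySem.Dict String String × String) (l : String)
    (h : ¬ PySem.Str.strip (PySem.Str.lower l) = "")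
    (hc : pvClassify pvKeywordTable (PySem.Str.strip (PySem.Str.lower l)) = none)
    (hg : st.2 ≠ "" ∧ PySem.Str.strip l ≠ "" ∧ PySem.Str.startswith l "#" = false) :
    pvStepA st l = (st.1.insert st.2 (pvStep (st.1.getD st.2 "") (PySem.Str.strip l)), st.2) := by
  rw [stepA_none_aux st l h hc, if_pos hg]
  by_cases hd : st.1.getD st.2 "" ∈ pvDefaultsA
  · rw [if_pos hd]; simp only [pvStep]; rw [if_pos hd]
  · rw [if_neg hd]; simp only [pvStep]; rw [if_neg hd]

lemma stepA_noadd (st : PySem.Dict String String × String) (l : String)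
    (h : ¬ PySem.Str.strip (PySem.Str.lower l) = "")
    (hc : pvClassify pvKeywordTable (PySem.Str.strip (PySem.Str.lower l)) = none)
    (hg : ¬ (st.2 ≠ "" ∧ PySem.Str.strip l ≠ "" ∧ PySem.Str.startswith l "#" = false)) :
    pvStepA st l = st := by
  rw [stepA_none_aux st l h hc, if_neg hg]

lemma A_fold : ∀ (ls : List String) (v1 v2 v3 v4 v5 v6 cur : String),
    (cur = "" ∨ cur = "ideal_customer_profile" ∨ cur = "pain_points" ∨ cur = "key_goals" ∨
     cur = "company_description" ∨ cur = "recent_news" ∨ cur = "key_personnel") →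
    (ls.foldl pvStepA (pvMk6 v1 v2 v3 v4 v5 v6, cur)).1 =
      pvMk6 (pvRed v1 (pvPieces ls cur "ideal_customer_profile"))
            (pvRed v2 (pvPieces ls cur "pain_points"))
            (pvRed v3 (pvPieces ls cur "key_goals"))
            (pvRed v4 (pvPieces ls cur "company_description"))
            (pvRed v5 (pvPieces ls cur "recent_news"))
            (pvRed v6 (pvPieces ls cur "key_personnel")) := by
  intro ls
  induction ls with
  | nil => intro v1 v2 v3 v4 v5 v6 cur _; simp [pvPieces, pvRed]
  | cons l ls ih =>
    intro v1 v2 v3 v4 v5 v6 cur hcur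
    rw [List.foldl_cons]
    by_cases h0 : PySem.Str.strip (PySem.Str.lower l) = ""
    · rw [stepA_skip _ _ h0]
      simp only [pieces_skip ls l cur h0]
      exact ih v1 v2 v3 v4 v5 v6 cur hcur
    · cases hc : pvClassify pvKeywordTable (PySem.Str.strip (PySem.Str.lower l)) with
      | some sec =>
        rw [stepA_hdr _ _ _ h0 hc]
        simp only [pieces_hdr ls l cur sec h0 hc]
        have hsec : sec = "ideal_customer_profile" ∨ sec = "pain_points" ∨ sec = "key_goals" ∨
            sec = "company_description" ∨ sec = "recent_news" ∨ sec = "key_personnel" := by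
          rw [classify_unfold] at hc
          split_ifs at hc <;> simp_all
        exact ih v1 v2 v3 v4 v5 v6 sec (Or.inr hsec)
      | none =>
        by_cases hg : cur ≠ "" ∧ PySem.Str.strip l ≠ "" ∧ PySem.Str.startswith l "#" = false
        · rw [stepA_add _ _ h0 hc hg]
          rcases hcur with rfl | rfl | rfl | rfl | rfl | rfl | rfl
          · exact absurd rfl hg.1
          · rw [mk6_getD_1, mk6_insert_1,
              pieces_add _ _ _ _ h0 hc ⟨rfl, hg⟩,
              pieces_noadd _ _ _ "pain_points" h0 hc (fun hh => absurd hh.1 (by decide)),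
              pieces_noadd _ _ _ "key_goals" h0 hc (fun hh => absurd hh.1 (by decide)),
              pieces_noadd _ _ _ "company_description" h0 hc (fun hh => absurd hh.1 (by decide)),
              pieces_noadd _ _ _ "recent_news" h0 hc (fun hh => absurd hh.1 (by decide)),
              pieces_noadd _ _ _ "key_personnel" h0 hc (fun hh => absurd hh.1 (by decide))]
            rw [show pvRed v1 (PySem.Str.strip l :: pvPieces ls "ideal_customer_profile" "ideal_customer_profile")
                  = pvRed (pvStep v1 (PySem.Str.strip l)) (pvPieces ls "ideal_customer_profile" "ideal_customer_profile") from rfl]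
            exact ih _ v2 v3 v4 v5 v6 _ (by simp)
          · rw [mk6_getD_2, mk6_insert_2,
              pieces_add _ _ _ _ h0 hc ⟨rfl, hg⟩,
              pieces_noadd _ _ _ "ideal_customer_profile" h0 hc (fun hh => absurd hh.1 (by decide)),
              pieces_noadd _ _ _ "key_goals" h0 hc (fun hh => absurd hh.1 (by decide)),
              pieces_noadd _ _ _ "company_description" h0 hc (fun hh => absurd hh.1 (by decide)),
              pieces_noadd _ _ _ "recent_news" h0 hc (fun hh => absurd hh.1 (by decide)),
              pieces_noadd _ _ _ "key_personnel" h0 hc (fun hh => absurd hh.1 (by decide))]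
            rw [show pvRed v2 (PySem.Str.strip l :: pvPieces ls "pain_points" "pain_points")
                  = pvRed (pvStep v2 (PySem.Str.strip l)) (pvPieces ls "pain_points" "pain_points") from rfl]
            exact ih v1 _ v3 v4 v5 v6 _ (by simp)
          · rw [mk6_getD_3, mk6_insert_3,
              pieces_add _ _ _ _ h0 hc ⟨rfl, hg⟩,
              pieces_noadd _ _ _ "ideal_customer_profile" h0 hc (fun hh => absurd hh.1 (by decide)),
              pieces_noadd _ _ _ "pain_points" h0 hc (fun hh => absurd hh.1 (by decide)),
              pieces_noadd _ _ _ "company_description" h0 hc (fun hh => absurd hh.1 (by decide)),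
              pieces_noadd _ _ _ "recent_news" h0 hc (fun hh => absurd hh.1 (by decide)),
              pieces_noadd _ _ _ "key_personnel" h0 hc (fun hh => absurd hh.1 (by decide))]
            rw [show pvRed v3 (PySem.Str.strip l :: pvPieces ls "key_goals" "key_goals")
                  = pvRed (pvStep v3 (PySem.Str.strip l)) (pvPieces ls "key_goals" "key_goals") from rfl]
            exact ih v1 v2 _ v4 v5 v6 _ (by simp)
          · rw [mk6_getD_4, mk6_insert_4,
              pieces_add _ _ _ _ h0 hc ⟨rfl, hg⟩,
              pieces_noadd _ _ _ "ideal_customer_profile" h0 hc (fun hh => absurd hh.1 (by decide)),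
              pieces_noadd _ _ _ "pain_points" h0 hc (fun hh => absurd hh.1 (by decide)),
              pieces_noadd _ _ _ "key_goals" h0 hc (fun hh => absurd hh.1 (by decide)),
              pieces_noadd _ _ _ "recent_news" h0 hc (fun hh => absurd hh.1 (by decide)),
              pieces_noadd _ _ _ "key_personnel" h0 hc (fun hh => absurd hh.1 (by decide))]
            rw [show pvRed v4 (PySem.Str.strip l :: pvPieces ls "company_description" "company_description")
                  = pvRed (pvStep v4 (PySem.Str.strip l)) (pvPieces ls "company_description" "company_description") from rfl]
            exact ih v1 v2 v3 _ v5 v6 _ (by simp)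
          · rw [mk6_getD_5, mk6_insert_5,
              pieces_add _ _ _ _ h0 hc ⟨rfl, hg⟩,
              pieces_noadd _ _ _ "ideal_customer_profile" h0 hc (fun hh => absurd hh.1 (by decide)),
              pieces_noadd _ _ _ "pain_points" h0 hc (fun hh => absurd hh.1 (by decide)),
              pieces_noadd _ _ _ "key_goals" h0 hc (fun hh => absurd hh.1 (by decide)),
              pieces_noadd _ _ _ "company_description" h0 hc (fun hh => absurd hh.1 (by decide)),
              pieces_noadd _ _ _ "key_personnel" h0 hc (fun hh => absurd hh.1 (by decide))]
            rw [show pvRed v5 (PySem.Str.strip l :: pvPieces ls "recent_news" "recent_news")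
                  = pvRed (pvStep v5 (PySem.Str.strip l)) (pvPieces ls "recent_news" "recent_news") from rfl]
            exact ih v1 v2 v3 v4 _ v6 _ (by simp)
          · rw [mk6_getD_6, mk6_insert_6,
              pieces_add _ _ _ _ h0 hc ⟨rfl, hg⟩,
              pieces_noadd _ _ _ "ideal_customer_profile" h0 hc (fun hh => absurd hh.1 (by decide)),
              pieces_noadd _ _ _ "pain_points" h0 hc (fun hh => absurd hh.1 (by decide)),
              pieces_noadd _ _ _ "key_goals" h0 hc (fun hh => absurd hh.1 (by decide)),
              pieces_noadd _ _ _ "company_description" h0 hc (fun hh => absurd hh.1 (by decide)),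
              pieces_noadd _ _ _ "recent_news" h0 hc (fun hh => absurd hh.1 (by decide))]
            rw [show pvRed v6 (PySem.Str.strip l :: pvPieces ls "key_personnel" "key_personnel")
                  = pvRed (pvStep v6 (PySem.Str.strip l)) (pvPieces ls "key_personnel" "key_personnel") from rfl]
            exact ih v1 v2 v3 v4 v5 _ _ (by simp)
        · rw [stepA_noadd _ _ h0 hc hg]
          simp only [pieces_noguard ls l cur h0 hc hg]
          exact ih v1 v2 v3 v4 v5 v6 cur hcur

-- ---- nonemptiness of the accumulated values ----

lemma append_space_ne (a b : String) : a ++ " " ++ b ≠ "" := by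
  intro h
  simpa using congrArg String.toList h

lemma pieces_ne : ∀ (ls : List String) (cur k p : String), p ∈ pvPieces ls cur k → p ≠ "" := by
  intro ls
  induction ls with
  | nil => intro cur k p hp; simp [pvPieces] at hp
  | cons l ls ih =>
    intro cur k p hp
    by_cases h0 : PySem.Str.strip (PySem.Str.lower l) = ""
    · rw [pieces_skip ls l cur h0] at hp; exact ih cur k p hp
    · cases hc : pvClassify pvKeywordTable (PySem.Str.strip (PySem.Str.lower l)) with
      | some sec =>
        rw [pieces_hdr ls l cur sec h0 hc] at hp; exact ih sec k p hp
      | none =>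
        by_cases hg : cur = k ∧ cur ≠ "" ∧ PySem.Str.strip l ≠ "" ∧ PySem.Str.startswith l "#" = false
        · rw [pieces_add ls l cur k h0 hc hg] at hp
          rcases List.mem_cons.mp hp with rfl | hp'
          · exact hg.2.2.1
          · exact ih cur k p hp'
        · rw [pieces_noadd ls l cur k h0 hc hg] at hp; exact ih cur k p hp

lemma pvRed_ne : ∀ (ps : List String) (a : String), a ≠ "" → (∀ p ∈ ps, p ≠ "") →
    pvRed a ps ≠ "" := by
  intro ps
  induction ps with
  | nil => intro a ha _; exact ha
  | cons p ps ih =>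
    intro a ha hps
    have hstep : pvStep a p ≠ "" := by
      simp only [pvStep]
      split
      · exact hps p (by simp)
      · exact append_space_ne _ _
    exact ih (pvStep a p) hstep (fun q hq => hps q (by simp [hq]))

-- ---- the final truncation ----

def pvTrunc (w : String) : String :=
  if w ≠ "" ∧ PySem.Str.len w > 500 then PySem.Str.slice w none (some 500) ++ "..." else w

lemma clean_1 (v1 v2 v3 v4 v5 v6 : String) :
    pvCleanA (pvMk6 v1 v2 v3 v4 v5 v6) "ideal_customer_profile" = pvMk6 (pvTrunc v1) v2 v3 v4 v5 v6 := by
  simp only [pvCleanA, pvTrunc, mk6_getD_1, mk6_insert_1]; split <;> rfl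
lemma clean_2 (v1 v2 v3 v4 v5 v6 : String) :
    pvCleanA (pvMk6 v1 v2 v3 v4 v5 v6) "pain_points" = pvMk6 v1 (pvTrunc v2) v3 v4 v5 v6 := by
  simp only [pvCleanA, pvTrunc, mk6_getD_2, mk6_insert_2]; split <;> rfl
lemma clean_3 (v1 v2 v3 v4 v5 v6 : String) :
    pvCleanA (pvMk6 v1 v2 v3 v4 v5 v6) "key_goals" = pvMk6 v1 v2 (pvTrunc v3) v4 v5 v6 := by
  simp only [pvCleanA, pvTrunc, mk6_getD_3, mk6_insert_3]; split <;> rfl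
lemma clean_4 (v1 v2 v3 v4 v5 v6 : String) :
    pvCleanA (pvMk6 v1 v2 v3 v4 v5 v6) "company_description" = pvMk6 v1 v2 v3 (pvTrunc v4) v5 v6 := by
  simp only [pvCleanA, pvTrunc, mk6_getD_4, mk6_insert_4]; split <;> rfl
lemma clean_5 (v1 v2 v3 v4 v5 v6 : String) :
    pvCleanA (pvMk6 v1 v2 v3 v4 v5 v6) "recent_news" = pvMk6 v1 v2 v3 v4 (pvTrunc v5) v6 := by
  simp only [pvCleanA, pvTrunc, mk6_getD_5, mk6_insert_5]; split <;> rfl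
lemma clean_6 (v1 v2 v3 v4 v5 v6 : String) :
    pvCleanA (pvMk6 v1 v2 v3 v4 v5 v6) "key_personnel" = pvMk6 v1 v2 v3 v4 v5 (pvTrunc v6) := by
  simp only [pvCleanA, pvTrunc, mk6_getD_6, mk6_insert_6]; split <;> rfl

lemma mk6_keys (v1 v2 v3 v4 v5 v6 : String) :
    (pvMk6 v1 v2 v3 v4 v5 v6).keys =
      ["ideal_customer_profile", "pain_points", "key_goals",
       "company_description", "recent_news", "key_personnel"] := rfl

lemma mk6_items (v1 v2 v3 v4 v5 v6 : String) :
    (pvMk6 v1 v2 v3 v4 v5 v6).items =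
      [("ideal_customer_profile", v1), ("pain_points", v2), ("key_goals", v3),
       ("company_description", v4), ("recent_news", v5), ("key_personnel", v6)] := rfl

lemma trunc_of_ne (w : String) (hw : w ≠ "") :
    pvTrunc w = if PySem.Str.len w > 500 then PySem.Str.slice w none (some 500) ++ "..." else w := by
  simp only [pvTrunc]
  exact if_congr (and_iff_right hw) rfl rfl

-- the defaults are nonempty
lemma defaults_ne :
    ("No customer profile information available" : String) ≠ "" ∧
    ("No pain points identified" : String) ≠ "" ∧
    ("No key goals identified" : String) ≠ "" ∧
    ("No company description available" : String) ≠ "" ∧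
    ("No recent news found" : String) ≠ "" ∧
    ("No personnel information available" : String) ≠ "" := by decide

-- ===== VERDICT (by name: the statement is the Claim_ definition above) =====
theorem extract_business_intelligence_fallback_py_spec : Claim_equal_extract_business_intelligence_fallback_py := by
  intro content _dom
  unfold Spec_extract_business_intelligence_fallback_py
  unfold extract_business_intelligence_fallback_py extract_business_intelligence_fallback_py_alt
  dsimp only
  set ls := (PySem.Str.split? content "\n").getD [] with hls
  -- A side
  have hinit : (PySem.Dict.ofList
      [("ideal_customer_profile", "No customer profile information available"),
       ("pain_points", "No pain points identified"),
       ("key_goals", "No key goals identified"),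
       ("company_description", "No company description available"),
       ("recent_news", "No recent news found"),
       ("key_personnel", "No personnel information available")] : PySem.Dict String String)
      = pvMk6 "No customer profile information available" "No pain points identified"
          "No key goals identified" "No company description available"
          "No recent news found" "No personnel information available" := rfl
  rw [hinit]
  rw [A_fold ls _ _ _ _ _ _ "" (Or.inl rfl)]
  rw [mk6_keys]
  simp only [List.foldl_cons, List.foldl_nil]
  rw [clean_1, clean_2, clean_3, clean_4, clean_5, clean_6, mk6_items]
  -- B side
  simp only [pvDefaultsTable, List.map_cons, List.map_nil]
  rw [fold_concat, fold_concat, fold_concat, fold_concat, fold_concat, fold_concat]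
  simp only [← pieces_concat]
  -- elementwise: pvTrunc w = B's truncation, since every w is nonempty
  have hne : ∀ (d k : String), d ≠ "" → pvRed d (pvPieces ls "" k) ≠ "" :=
    fun d k hd => pvRed_ne _ d hd (fun p hp => pieces_ne ls "" k p hp)
  rw [trunc_of_ne _ (hne _ _ defaults_ne.1),
      trunc_of_ne _ (hne _ _ defaults_ne.2.1),
      trunc_of_ne _ (hne _ _ defaults_ne.2.2.1),
      trunc_of_ne _ (hne _ _ defaults_ne.2.2.2.1),
      trunc_of_ne _ (hne _ _ defaults_ne.2.2.2.2.1),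
      trunc_of_ne _ (hne _ _ defaults_ne.2.2.2.2.2)]
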